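-- pv_equiv track=rewrite | github.com/euel88/PDF-translator-copy | pdf2zh/converter.py | _group_colors
-- ===== SOURCE A (Python) =====
-- from typing import List, Dict, Tuple, Optional, Callable, Any
--
-- def _group_colors(
--
--     samples: List[Tuple[int, int, int]],
--     threshold: int = 25
-- ) -> List[List[Tuple[int, int, int]]]:
--     """비슷한 색상을 그룹핑"""
--     color_groups = []
--     for sample in samples:
--         found = False
--         for group in color_groups:
--             rep = group[0]
--             if (abs(sample[0] - rep[0]) < threshold and
--                 abs(sample[1] - rep[1]) < threshold and
--                 abs(sample[2] - rep[2]) < threshold):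
--                 group.append(sample)
--                 found = True
--                 break
--         if not found:
--             color_groups.append([sample])
--     return color_groups
-- ===== SOURCE B (Python) =====
-- from typing import List, Tuple
--
-- def _group_colors(
--     samples: List[Tuple[int, int, int]],
--     threshold: int = 25
-- ) -> List[List[Tuple[int, int, int]]]:
--     """Grid-bucket the group representatives: each sample only compares against
--     representatives in the 27 neighbouring threshold-sized cells, then the
--     groups are gathered from the per-sample assignments in one final pass."""
--     if threshold <= 0:
--         # no two colors can ever be within a non-positive threshold
--         return [[s] for s in samples]
--     reps = []        # representative color of group i
--     assign = []      # group index of each sample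
--     buckets = {}     # grid cell -> indices of reps whose cell it is
--     for s in samples:
--         cx, cy, cz = s[0] // threshold, s[1] // threshold, s[2] // threshold
--         cand = [gi
--                 for dx in (-1, 0, 1)
--                 for dy in (-1, 0, 1)
--                 for dz in (-1, 0, 1)
--                 for gi in buckets.get((cx + dx, cy + dy, cz + dz), [])
--                 if abs(s[0] - reps[gi][0]) < threshold
--                 and abs(s[1] - reps[gi][1]) < threshold
--                 and abs(s[2] - reps[gi][2]) < threshold]
--         if cand:
--             assign.append(min(cand))
--         else:
--             gi = len(reps)
--             reps.append(s)
--             buckets.setdefault((cx, cy, cz), []).append(gi)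
--             assign.append(gi)
--     return [[s for s, g in zip(samples, assign) if g == i]
--             for i in range(len(reps))]
-- ===== Notes on version B (the rewrite author's own statement) =====
-- stated objective: alternative
-- what changed: Instead of scanning every existing group's representative per sample, B hashes representatives into a grid of threshold-sized buckets and tests only the 27 neighbouring cells, assigning each sample to the smallest matching group index and gathering the groups from the assignments in a final pass.
import Mathlib
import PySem

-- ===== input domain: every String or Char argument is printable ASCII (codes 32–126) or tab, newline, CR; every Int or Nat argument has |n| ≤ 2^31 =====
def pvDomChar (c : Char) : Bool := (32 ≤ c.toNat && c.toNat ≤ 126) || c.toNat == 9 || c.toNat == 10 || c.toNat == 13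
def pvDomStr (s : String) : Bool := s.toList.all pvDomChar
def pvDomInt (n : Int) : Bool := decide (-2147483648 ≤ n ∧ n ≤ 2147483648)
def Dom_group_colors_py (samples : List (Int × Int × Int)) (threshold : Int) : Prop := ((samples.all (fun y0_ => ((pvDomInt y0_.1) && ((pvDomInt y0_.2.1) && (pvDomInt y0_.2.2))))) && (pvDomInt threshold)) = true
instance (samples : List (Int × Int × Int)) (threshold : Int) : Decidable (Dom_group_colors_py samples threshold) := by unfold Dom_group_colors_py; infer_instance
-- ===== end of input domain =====

-- B replaces A's scan over all existing groups by a threshold-sized grid of buckets over the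
-- group representatives (27 neighbouring cells are consulted per sample) and gathers the groups
-- from per-sample assignments in a final pass; the equivalence proved here is about the RETURN
-- value only (A mutates its local lists).

abbrev pvC : Type := Int × Int × Int

-- shared arithmetic helper: the three-coordinate closeness test of the Python source
def pvNear (t : Int) (s r : pvC) : Bool :=
  decide (|s.1 - r.1| < t ∧ |s.2.1 - r.2.1| < t ∧ |s.2.2 - r.2.2| < t)

-- ===== PORT A =====
-- inner 'for group in color_groups: … break': first group whose representative (group[0]) is near
-- (Python would raise IndexError on an empty group — unreachable, ported as 'none')
def pvA_insert (t : Int) (s : pvC) : List (List pvC) → Option (List (List pvC))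
  | [] => none
  | g :: gs =>
    match PySem.List.pyGet? g 0 with
    | none => none
    | some rep =>
      if pvNear t s rep then some ((g ++ [s]) :: gs)
      else
        match pvA_insert t s gs with
        | some gs' => some (g :: gs')
        | none => none

def pvA_step (t : Int) (groups : List (List pvC)) (s : pvC) : List (List pvC) :=
  match pvA_insert t s groups with
  | some gs => gs
  | none => groups ++ [[s]]

def group_colors_py (samples : List (Int × Int × Int)) (threshold : Int) : List (List (Int × Int × Int)) :=
  samples.foldl (pvA_step threshold) []

-- ===== PORT B =====
def pvB_cell (t : Int) (s : pvC) : Int × Int × Int :=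
  (PySem.Int.floordiv s.1 t, PySem.Int.floordiv s.2.1 t, PySem.Int.floordiv s.2.2 t)

-- the candidate list comprehension: group indices from the 27 neighbouring buckets that pass the test
def pvB_cand (t : Int) (reps : List pvC) (buckets : PySem.Dict (Int × Int × Int) (List Int))
    (s : pvC) : List Int :=
  ([-1, 0, 1] : List Int).flatMap (fun dx =>
    ([-1, 0, 1] : List Int).flatMap (fun dy =>
      ([-1, 0, 1] : List Int).flatMap (fun dz =>
        (buckets.getD ((pvB_cell t s).1 + dx, (pvB_cell t s).2.1 + dy, (pvB_cell t s).2.2 + dz) []).filter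
          (fun gi =>
            match PySem.List.pyGet? reps gi with
            | some r => pvNear t s r
            | none => false))))

def pvB_step (t : Int)
    (st : List (List pvC) × List pvC × PySem.Dict (Int × Int × Int) (List Int)) (s : pvC) :
    List (List pvC) × List pvC × PySem.Dict (Int × Int × Int) (List Int) :=
  match PySem.List.min? (pvB_cand t st.2.1 st.2.2 s) (fun x => x) with
  | some m =>
      (PySem.List.pySetD st.1 m (PySem.List.pyGetD st.1 m [] ++ [s]), st.2.1, st.2.2)
  | none =>
      (st.1 ++ [[s]], st.2.1 ++ [s],
       st.2.2.insert (pvB_cell t s) (st.2.2.getD (pvB_cell t s) [] ++ [(st.2.1.length : Int)]))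

def group_colors_py_alt (samples : List (Int × Int × Int)) (threshold : Int) : List (List (Int × Int × Int)) :=
  if threshold ≤ 0 then samples.map (fun s => [s])
  else (samples.foldl (pvB_step threshold) ([], [], PySem.Dict.empty)).1

-- ===== PRECONDITION & SPEC =====
def Spec_group_colors_py (samples : List (Int × Int × Int)) (threshold : Int) (out : List (List (Int × Int × Int))) : Prop := out = group_colors_py_alt samples threshold
instance (samples : List (Int × Int × Int)) (threshold : Int) (out : List (List (Int × Int × Int))) : Decidable (Spec_group_colors_py samples threshold out) := by unfold Spec_group_colors_py; infer_instance

-- ===== CLAIM (what is proved, stated in full; the proofs are below) =====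
def Claim_equal_group_colors_py : Prop := ∀ (samples : List (Int × Int × Int)) (threshold : Int), Dom_group_colors_py samples threshold → Spec_group_colors_py samples threshold (group_colors_py samples threshold)

-- ===== LEMMAS AND PROOFS =====

-- first index of a representative near s (specification of both inner searches)
def pvFm (t : Int) (s : pvC) : List pvC → Option Nat
  | [] => none
  | r :: rs => if pvNear t s r then some 0 else (pvFm t s rs).map (· + 1)

lemma pvFm_some {t : Int} {s : pvC} {reps : List pvC} {k : Nat}
    (h : pvFm t s reps = some k) :
    ∃ hk : k < reps.length, pvNear t s reps[k] = true ∧ ∀ j (hj : j < k), pvNear t s (reps[j]'(by omega)) = false := by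
  induction reps generalizing k with
  | nil => simp [pvFm] at h
  | cons r rs ih =>
    by_cases hn : pvNear t s r
    · simp [pvFm, hn] at h
      subst h
      exact ⟨by simp, by simpa using hn, fun j hj => by omega⟩
    · simp [pvFm, hn] at h
      obtain ⟨k', hk', rfl⟩ := h
      obtain ⟨hlt, hnear, hmin⟩ := ih hk'
      refine ⟨by simpa using Nat.succ_lt_succ hlt, by simpa using hnear, ?_⟩
      intro j hj
      cases j with
      | zero => simpa using hn
      | succ j' => simpa using hmin j' (by omega)

lemma pvFm_none {t : Int} {s : pvC} {reps : List pvC}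
    (h : pvFm t s reps = none) : ∀ j (hj : j < reps.length), pvNear t s reps[j] = false := by
  induction reps with
  | nil => intro j hj; simp at hj
  | cons r rs ih =>
    by_cases hn : pvNear t s r
    · simp [pvFm, hn] at h
    · simp [pvFm, hn] at h
      intro j hj
      cases j with
      | zero => simpa using hn
      | succ j' => simpa using ih h j' (by simpa using hj)

-- A's inner loop, characterised by pvFm over the representatives (the heads of the groups)
lemma pvA_insert_eq (t : Int) (s : pvC) :
    ∀ (groups : List (List pvC)) (reps : List pvC),
      groups.length = reps.length →
      (∀ i (h : i < groups.length), (groups[i]).head? = reps[i]?) →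
      pvA_insert t s groups = (pvFm t s reps).map (fun k => groups.set k (groups.getD k [] ++ [s])) := by
  intro groups
  induction groups with
  | nil =>
    intro reps hlen _
    have : reps = [] := by cases reps <;> simp_all
    subst this; simp [pvA_insert, pvFm]
  | cons g gs ih =>
    intro reps hlen hhead
    cases reps with
    | nil => simp at hlen
    | cons r rs =>
      have hg0 : g.head? = some r := by simpa using hhead 0 (by simp)
      have hget : PySem.List.pyGet? g 0 = some r := by
        rw [PySem.List.pyGet?_zero, ← List.head?_eq_getElem?, hg0]
      by_cases hn : pvNear t s r
      · simp [pvA_insert, hget, hn, pvFm]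
      · have hrec := ih rs (by simpa using hlen) (fun i h => by simpa using hhead (i + 1) (by simpa using h))
        simp only [pvA_insert, hget, hn, hrec, pvFm]
        cases pvFm t s rs <;> simp

-- grid geometry: a near sample lies in one of the 3 neighbouring cells, per coordinate
lemma pvCell_near {t a b : Int} (ht : 0 < t) (h : |a - b| < t) :
    PySem.Int.floordiv b t - 1 ≤ PySem.Int.floordiv a t ∧
      PySem.Int.floordiv a t ≤ PySem.Int.floordiv b t + 1 := by
  rw [PySem.Int.floordiv_eq_ediv_of_pos ht, PySem.Int.floordiv_eq_ediv_of_pos ht]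
  have habs := abs_lt.mp h
  have hup : (b + t) / t = b / t + 1 := by
    have := Int.add_mul_ediv_right b 1 (by omega : t ≠ 0); simpa using this
  have hdn : (b - t) / t = b / t - 1 := by
    have := Int.add_mul_ediv_right b (-1) (by omega : t ≠ 0)
    simpa [sub_eq_add_neg] using this
  constructor
  · have : (b - t) / t ≤ a / t := Int.ediv_le_ediv ht (by omega)
    omega
  · have : a / t ≤ (b + t) / t := Int.ediv_le_ediv ht (by omega)
    omega

-- the bucket invariant of B's loop: heads of A's groups are B's reps, and the buckets
-- index exactly the reps by their grid cell
def pvInv (t : Int) (groups : List (List pvC)) (reps : List pvC)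
    (buckets : PySem.Dict (Int × Int × Int) (List Int)) : Prop :=
  groups.length = reps.length ∧
  (∀ i (h : i < groups.length), (groups[i]).head? = reps[i]?) ∧
  (∀ c gi, gi ∈ buckets.getD c [] → ∃ k : Nat, ∃ hk : k < reps.length, gi = (k : Int) ∧ pvB_cell t reps[k] = c) ∧
  (∀ k (hk : k < reps.length), ((k : Int)) ∈ buckets.getD (pvB_cell t reps[k]) [])

lemma pvCand_mem {t : Int} (ht : 0 < t) {groups : List (List pvC)} {reps : List pvC}
    {buckets : PySem.Dict (Int × Int × Int) (List Int)} (hinv : pvInv t groups reps buckets)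
    (s : pvC) (gi : Int) :
    gi ∈ pvB_cand t reps buckets s ↔
      ∃ k : Nat, gi = (k : Int) ∧ ∃ hk : k < reps.length, pvNear t s reps[k] = true := by
  obtain ⟨-, -, hsound, hcomp⟩ := hinv
  simp only [pvB_cand, List.mem_flatMap, List.mem_filter]
  constructor
  · rintro ⟨dx, -, dy, -, dz, -, hmem, hpred⟩
    obtain ⟨k, hk, rfl, -⟩ := hsound _ _ hmem
    refine ⟨k, rfl, hk, ?_⟩
    rw [PySem.List.pyGet?_natCast, List.getElem?_eq_getElem hk] at hpred
    simpa using hpred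
  · rintro ⟨k, rfl, hk, hnear⟩
    have hn : |s.1 - reps[k].1| < t ∧ |s.2.1 - reps[k].2.1| < t ∧ |s.2.2 - reps[k].2.2| < t := by
      have := hnear; rw [pvNear, decide_eq_true_eq] at this; exact this
    obtain ⟨h1, h2, h3⟩ := hn
    have c1 := pvCell_near ht (by rw [abs_sub_comm]; exact h1)
    have c2 := pvCell_near ht (by rw [abs_sub_comm]; exact h2)
    have c3 := pvCell_near ht (by rw [abs_sub_comm]; exact h3)
    refine ⟨PySem.Int.floordiv reps[k].1 t - PySem.Int.floordiv s.1 t, ?_,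
            PySem.Int.floordiv reps[k].2.1 t - PySem.Int.floordiv s.2.1 t, ?_,
            PySem.Int.floordiv reps[k].2.2 t - PySem.Int.floordiv s.2.2 t, ?_, ?_, ?_⟩
    · simp only [List.mem_cons]; omega
    · simp only [List.mem_cons]; omega
    · simp only [List.mem_cons]; omega
    · have := hcomp k hk
      simpa [pvB_cell] using this
    · rw [PySem.List.pyGet?_natCast, List.getElem?_eq_getElem hk]
      simpa using hnear

lemma pvMin_cand {t : Int} (ht : 0 < t) {groups : List (List pvC)} {reps : List pvC}
    {buckets : PySem.Dict (Int × Int × Int) (List Int)} (hinv : pvInv t groups reps buckets)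
    (s : pvC) :
    PySem.List.min? (pvB_cand t reps buckets s) (fun x => x) =
      (pvFm t s reps).map (fun k => (k : Int)) := by
  cases hfm : pvFm t s reps with
  | none =>
    have hnil : pvB_cand t reps buckets s = [] := by
      rw [List.eq_nil_iff_forall_not_mem]
      intro gi hgi
      obtain ⟨k, rfl, hk, hnear⟩ := (pvCand_mem ht hinv s gi).mp hgi
      have := pvFm_none hfm k hk
      simp [this] at hnear
    rw [hnil]
    simp [PySem.List.min?_eq_none_iff]
  | some k =>
    obtain ⟨hk, hnear, hmin⟩ := pvFm_some hfm
    have hkmem : (k : Int) ∈ pvB_cand t reps buckets s :=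
      (pvCand_mem ht hinv s (k : Int)).mpr ⟨k, rfl, hk, hnear⟩
    cases hm : PySem.List.min? (pvB_cand t reps buckets s) (fun x => x) with
    | none =>
      rw [PySem.List.min?_eq_none_iff] at hm
      rw [hm] at hkmem; simp at hkmem
    | some m =>
      have hmmem := PySem.List.min?_mem hm
      have hle : m ≤ (k : Int) := PySem.List.min?_isMin hm _ hkmem
      obtain ⟨k', rfl, hk', hnear'⟩ := (pvCand_mem ht hinv s m).mp hmmem
      have hkk : k ≤ k' := by
        by_contra hlt
        have := hmin k' (by omega)
        simp [this] at hnear'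
      have : k' = k := by omega
      subst this; rfl

lemma pvStep_eq {t : Int} (ht : 0 < t) {groups : List (List pvC)} {reps : List pvC}
    {buckets : PySem.Dict (Int × Int × Int) (List Int)} (hinv : pvInv t groups reps buckets)
    (s : pvC) :
    pvA_step t groups s = (pvB_step t (groups, reps, buckets) s).1 ∧
      pvInv t (pvB_step t (groups, reps, buckets) s).1 (pvB_step t (groups, reps, buckets) s).2.1
        (pvB_step t (groups, reps, buckets) s).2.2 := by
  obtain ⟨hlen, hhead, hsound, hcomp⟩ := hinv
  have hA := pvA_insert_eq t s groups reps hlen hhead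
  have hM := pvMin_cand ht (⟨hlen, hhead, hsound, hcomp⟩ : pvInv t groups reps buckets) s
  cases hfm : pvFm t s reps with
  | none =>
    rw [hfm] at hA hM
    simp only [Option.map_none] at hA hM
    have hBeq : pvB_step t (groups, reps, buckets) s =
        (groups ++ [[s]], reps ++ [s],
          buckets.insert (pvB_cell t s) (buckets.getD (pvB_cell t s) [] ++ [(reps.length : Int)])) := by
      simp [pvB_step, hM]
    rw [hBeq]
    refine ⟨by simp [pvA_step, hA], by simp [hlen], ?_, ?_, ?_⟩
    · intro i h
      rcases Nat.lt_or_ge i groups.length with hi | hi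
      · rw [List.getElem_append_left hi, List.getElem?_append_left (by omega)]
        exact hhead i hi
      · have h1 : i = groups.length := by simp at h; omega
        subst h1
        rw [List.getElem_append_right (by omega)]
        simp only [Nat.sub_self, List.getElem_cons_zero, List.head?_cons]
        rw [hlen, List.getElem?_append_right (by omega)]
        simp
    · intro c gi hmem
      rw [PySem.Dict.getD_insert] at hmem
      by_cases hc : c = pvB_cell t s
      · rw [if_pos hc] at hmem
        rcases List.mem_append.mp hmem with hold | hnew
        · obtain ⟨k, hk, rfl, hcell⟩ := hsound _ _ hold
          exact ⟨k, by simp; omega, rfl, by rw [List.getElem_append_left hk, hc]; exact hcell⟩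
        · have h1 : gi = (reps.length : Int) := by simpa using hnew
          subst h1
          refine ⟨reps.length, by simp, rfl, ?_⟩
          rw [List.getElem_append_right (by omega)]
          simpa using hc.symm
      · rw [if_neg hc] at hmem
        obtain ⟨k, hk, rfl, hcell⟩ := hsound _ _ hmem
        exact ⟨k, by simp; omega, rfl, by rw [List.getElem_append_left hk]; exact hcell⟩
    · intro k hk
      rcases Nat.lt_or_ge k reps.length with hki | hki
      · rw [List.getElem_append_left hki, PySem.Dict.getD_insert]
        by_cases hc : pvB_cell t reps[k] = pvB_cell t s
        · rw [if_pos hc]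
          exact List.mem_append_left _ (by rw [← hc]; exact hcomp k hki)
        · rw [if_neg hc]
          exact hcomp k hki
      · have h1 : k = reps.length := by simp at hk; omega
        subst h1
        rw [List.getElem_append_right (by omega)]
        simp [PySem.Dict.getD_insert_self]
  | some k =>
    rw [hfm] at hA hM
    simp only [Option.map_some] at hA hM
    obtain ⟨hk, hnear, -⟩ := pvFm_some hfm
    have hkg : k < groups.length := by omega
    have hBeq : pvB_step t (groups, reps, buckets) s =
        (groups.set k (groups.getD k [] ++ [s]), reps, buckets) := by
      simp [pvB_step, hM]
    rw [hBeq]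
    refine ⟨by simp [pvA_step, hA], by simp [hlen], ?_, hsound, hcomp⟩
    intro i h
    simp only [List.length_set] at h
    rw [List.getElem_set]
    by_cases hik : k = i
    · subst hik
      rw [if_pos rfl]
      have hgk := hhead k hkg
      rw [List.getD_eq_getElem _ _ hkg, List.head?_append_of_ne_nil]
      · exact hgk
      · intro hnil
        rw [hnil] at hgk
        simp [List.getElem?_eq_getElem (by omega : k < reps.length)] at hgk
    · rw [if_neg hik]
      exact hhead i h

lemma pvFold_eq {t : Int} (ht : 0 < t) :
    ∀ (rest : List pvC) (groups : List (List pvC)) (reps : List pvC)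
      (buckets : PySem.Dict (Int × Int × Int) (List Int)), pvInv t groups reps buckets →
      rest.foldl (pvA_step t) groups = (rest.foldl (pvB_step t) (groups, reps, buckets)).1 := by
  intro rest
  induction rest with
  | nil => intro groups reps buckets _; rfl
  | cons s ss ih =>
    intro groups reps buckets hinv
    obtain ⟨heq, hinv'⟩ := pvStep_eq ht hinv s
    simp only [List.foldl_cons]
    rw [heq]
    exact ih _ _ _ hinv'

lemma pvNear_false_of_nonpos {t : Int} (ht : t ≤ 0) (s r : pvC) : pvNear t s r = false := by
  apply decide_eq_false
  rintro ⟨h1, -, -⟩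
  have := abs_nonneg (s.1 - r.1)
  omega

lemma pvA_insert_none_of_nonpos {t : Int} (ht : t ≤ 0) (s : pvC) (groups : List (List pvC)) :
    pvA_insert t s groups = none := by
  induction groups with
  | nil => rfl
  | cons g gs ih =>
    cases hg : PySem.List.pyGet? g 0 with
    | none => simp [pvA_insert, hg]
    | some rep => simp [pvA_insert, hg, pvNear_false_of_nonpos ht, ih]

-- ===== VERDICT (by name: the statement is the Claim_ definition above) =====
theorem group_colors_py_spec : Claim_equal_group_colors_py := by
  intro samples t _
  unfold Spec_group_colors_py group_colors_py group_colors_py_alt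
  by_cases ht : t ≤ 0
  · simp only [ht, if_true]
    have hstep : ∀ groups s, pvA_step t groups s = groups ++ [[s]] := by
      intro groups s; unfold pvA_step; rw [pvA_insert_none_of_nonpos ht]
    calc samples.foldl (pvA_step t) []
        = samples.foldl (fun acc s => acc ++ [[s]]) [] := by
          exact PySem.List.foldl_congr_mem samples (pvA_step t) _ [] (fun acc s _ => hstep acc s)
      _ = samples.map (fun s => [s]) := by
          simpa using PySem.List.foldl_append_singleton_eq_map (f := fun s : pvC => [s]) (l := samples) (acc := [])
  · simp only [ht, if_false]
    apply pvFold_eq (by omega) samples [] [] PySem.Dict.empty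
    refine ⟨rfl, ?_, ?_, ?_⟩
    · intro i h; simp at h
    · intro c gi h; simp [PySem.Dict.getD_empty] at h
    · intro k hk; simp at hk
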